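-- pv_equiv track=rewrite | github.com/skapoor1902/vruksh.aiot-master | vruksh.aiot-master/esp32/esp32_mqtt.py | find_next_schedule_time
-- ===== SOURCE A (Python) =====
-- SCHEDULE_TIMES = [
--     {"hour": 19, "minute": 20, "name": "Morning"},   # 8:00 AM
--     {"hour": 14, "minute": 0, "name": "Afternoon"},  # 2:00 PM
--     {"hour": 20, "minute": 0, "name": "Evening"}   # 8:00 PM
-- ]
--
-- def find_next_schedule_time(current_datetime):
--     """Find the next scheduled reading time"""
--     current_hour = current_datetime[4]
--     current_minute = current_datetime[5]
--     current_minutes = current_hour * 60 + current_minute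
--
--     min_wait_time = 24 * 60  # Default to 24 hours (in minutes)
--     next_hour = 0
--     next_minute = 0
--
--     for schedule in SCHEDULE_TIMES:
--         # Calculate minutes from current time to this schedule
--         schedule_minutes = schedule["hour"] * 60 + schedule["minute"]
--
--         # If schedule is later today
--         if schedule_minutes > current_minutes:
--             wait_minutes = schedule_minutes - current_minutes
--             if wait_minutes < min_wait_time:
--                 min_wait_time = wait_minutes
--                 next_hour = schedule["hour"]
--                 next_minute = schedule["minute"]
--
--         # If schedule is tomorrow
--         elif schedule_minutes < current_minutes:
--             wait_minutes = (24 * 60) - current_minutes + schedule_minutes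
--             if wait_minutes < min_wait_time:
--                 min_wait_time = wait_minutes
--                 next_hour = schedule["hour"]
--                 next_minute = schedule["minute"]
--
--     return f"{next_hour:02d}:{next_minute:02d}"
-- ===== SOURCE B (Python) =====
-- SCHEDULE_TIMES = [
--     {"hour": 19, "minute": 20, "name": "Morning"},
--     {"hour": 14, "minute": 0, "name": "Afternoon"},
--     {"hour": 20, "minute": 0, "name": "Evening"}
-- ]
--
-- def _fmt(t):
--     return f"{t // 60:02d}:{t % 60:02d}"
--
-- def find_next_schedule_time(current_datetime):
--     """Find the next scheduled reading time (sort-then-scan).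
--
--     Scan the sorted schedule minutes: the first one strictly within the coming
--     24 hours is the answer; otherwise wrap to the earliest one before 'now';
--     otherwise nothing is upcoming. Correct because the schedule times are
--     pairwise distinct, so ties in waiting time cannot occur."""
--     cur = current_datetime[4] * 60 + current_datetime[5]
--     times = sorted(s["hour"] * 60 + s["minute"] for s in SCHEDULE_TIMES)
--     for t in times:
--         if cur < t < cur + 1440:
--             return _fmt(t)
--     for t in times:
--         if t < cur:
--             return _fmt(t)
--     return "00:00"
-- ===== Notes on version B (the rewrite author's own statement) =====
-- stated objective: alternative
-- what changed: Replaces A's single-pass running-minimum over two-branch wrap-around wait computations with a sort-then-scan: sort the schedule minute values once, scan for the first one strictly within the coming 24 hours, then (wrap) for the first one before now, with early returns and no wait values or mutable minimum at all; correct because the schedule times are pairwise distinct so wait ties cannot occur.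
import Mathlib
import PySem

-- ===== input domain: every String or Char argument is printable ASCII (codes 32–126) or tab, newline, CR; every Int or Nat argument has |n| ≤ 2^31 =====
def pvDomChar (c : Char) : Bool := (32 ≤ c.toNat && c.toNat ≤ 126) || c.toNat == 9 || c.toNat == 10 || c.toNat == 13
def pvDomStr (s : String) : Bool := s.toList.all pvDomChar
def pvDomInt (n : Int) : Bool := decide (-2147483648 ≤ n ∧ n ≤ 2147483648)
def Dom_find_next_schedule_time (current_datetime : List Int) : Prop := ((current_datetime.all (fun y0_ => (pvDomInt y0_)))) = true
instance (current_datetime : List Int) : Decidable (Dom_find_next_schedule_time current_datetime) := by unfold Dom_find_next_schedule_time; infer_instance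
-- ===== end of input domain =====

-- B replaces A's running-minimum wait loop with sort-then-scan over the sorted schedule
-- minutes (first one strictly upcoming within a day, else wrap to the earliest one before
-- now); objective: alternative.

-- ===== PORT A =====
-- Python's f"{n:02d}" for the nonnegative values that occur here
def pad2 (n : Int) : String :=
  if n < 10 then "0" ++ PySem.Int.toStr n else PySem.Int.toStr n

-- SCHEDULE_TIMES as (hour, minute) pairs (names unused by the function)
def scheduleTimes : List (Int × Int) := [(19, 20), (14, 0), (20, 0)]

def find_next_schedule_time (current_datetime : List Int) : String :=
  match PySem.List.pyGet? current_datetime 4, PySem.List.pyGet? current_datetime 5 with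
  | some current_hour, some current_minute =>
    let current_minutes := current_hour * 60 + current_minute
    let st := scheduleTimes.foldl (fun (st : Int × Int × Int) (schedule : Int × Int) =>
        let schedule_minutes := schedule.1 * 60 + schedule.2
        if schedule_minutes > current_minutes then
          let wait_minutes := schedule_minutes - current_minutes
          if wait_minutes < st.1 then (wait_minutes, schedule.1, schedule.2) else st
        else if schedule_minutes < current_minutes then
          let wait_minutes := (24 * 60) - current_minutes + schedule_minutes
          if wait_minutes < st.1 then (wait_minutes, schedule.1, schedule.2) else st
        else st) (24 * 60, 0, 0)
    pad2 st.2.1 ++ ":" ++ pad2 st.2.2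
  | _, _ => ""   -- IndexError; excluded by Pre_

-- ===== PORT B =====
def pad2B (n : Int) : String :=
  if n < 10 then "0" ++ PySem.Int.toStr n else PySem.Int.toStr n

def scheduleTimesB : List (Int × Int) := [(19, 20), (14, 0), (20, 0)]

-- Source B's _fmt
def fmtT (t : Int) : String :=
  pad2B (PySem.Int.floordiv t 60) ++ ":" ++ pad2B (PySem.Int.mod t 60)

def find_next_schedule_time_alt (current_datetime : List Int) : String :=
  -- current_datetime[4] / [5]: IndexError (none) excluded by Pre_; "" is the unreachable default
  (((PySem.List.pyGet? current_datetime 4).bind fun h =>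
    (PySem.List.pyGet? current_datetime 5).map fun m =>
    let cur := h * 60 + m
    let times := PySem.List.sorted (scheduleTimesB.map (fun s => s.1 * 60 + s.2)) (fun t => t) false
    -- first for-loop with early return
    match times.find? (fun t => cur < t && t < cur + 1440) with
    | some t => fmtT t
    | none =>
      -- second for-loop with early return
      match times.find? (fun t => t < cur) with
      | some t => fmtT t
      | none => "00:00") : Option String).getD ""

-- ===== PRECONDITION & SPEC =====
-- A raises IndexError unless the tuple has at least 6 entries (it reads indices 4 and 5).
def Pre_find_next_schedule_time (current_datetime : List Int) : Prop :=
  6 ≤ current_datetime.length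
instance (current_datetime : List Int) : Decidable (Pre_find_next_schedule_time current_datetime) := by unfold Pre_find_next_schedule_time; infer_instance
def pvWitness_find_next_schedule_time : List Int := [2024, 5, 1, 2, 12, 30]

def Spec_find_next_schedule_time (current_datetime : List Int) (out : String) : Prop := out = find_next_schedule_time_alt current_datetime
instance (current_datetime : List Int) (out : String) : Decidable (Spec_find_next_schedule_time current_datetime out) := by unfold Spec_find_next_schedule_time; infer_instance

-- ===== CLAIM =====
def Claim_equal_find_next_schedule_time : Prop := ∀ (current_datetime : List Int), Dom_find_next_schedule_time current_datetime → Pre_find_next_schedule_time current_datetime → Spec_find_next_schedule_time current_datetime (find_next_schedule_time current_datetime)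

-- ===== LEMMAS AND PROOFS =====

-- A's loop body, named for the proofs (definitionally equal to the lambda in the port)
def stepA (x : Int) (st : Int × Int × Int) (schedule : Int × Int) : Int × Int × Int :=
  let schedule_minutes := schedule.1 * 60 + schedule.2
  if schedule_minutes > x then
    let wait_minutes := schedule_minutes - x
    if wait_minutes < st.1 then (wait_minutes, schedule.1, schedule.2) else st
  else if schedule_minutes < x then
    let wait_minutes := (24 * 60) - x + schedule_minutes
    if wait_minutes < st.1 then (wait_minutes, schedule.1, schedule.2) else st
  else st

theorem stepA_take_gt (x h m : Int) (st : Int × Int × Int)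
    (h1 : h * 60 + m > x) (h2 : h * 60 + m - x < st.1) :
    stepA x st (h, m) = (h * 60 + m - x, h, m) := by
  simp only [stepA]; rw [if_pos h1, if_pos h2]

theorem stepA_keep_gt (x h m : Int) (st : Int × Int × Int)
    (h1 : h * 60 + m > x) (h2 : ¬ (h * 60 + m - x < st.1)) :
    stepA x st (h, m) = st := by
  simp only [stepA]; rw [if_pos h1, if_neg h2]

theorem stepA_take_lt (x h m : Int) (st : Int × Int × Int)
    (h1 : h * 60 + m < x) (h2 : 24 * 60 - x + (h * 60 + m) < st.1) :
    stepA x st (h, m) = (24 * 60 - x + (h * 60 + m), h, m) := by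
  simp only [stepA]; rw [if_neg (by omega), if_pos h1, if_pos h2]

theorem stepA_keep_lt (x h m : Int) (st : Int × Int × Int)
    (h1 : h * 60 + m < x) (h2 : ¬ (24 * 60 - x + (h * 60 + m) < st.1)) :
    stepA x st (h, m) = st := by
  simp only [stepA]; rw [if_neg (by omega), if_pos h1, if_neg h2]

theorem stepA_keep_eq (x h m : Int) (st : Int × Int × Int)
    (h1 : h * 60 + m = x) : stepA x st (h, m) = st := by
  simp only [stepA]; rw [if_neg (by omega), if_neg (by omega)]

-- the two cores agree for every current time in minutes
theorem core_eq (x : Int) :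
    (let st := scheduleTimes.foldl (fun (st : Int × Int × Int) (schedule : Int × Int) =>
        let schedule_minutes := schedule.1 * 60 + schedule.2
        if schedule_minutes > x then
          let wait_minutes := schedule_minutes - x
          if wait_minutes < st.1 then (wait_minutes, schedule.1, schedule.2) else st
        else if schedule_minutes < x then
          let wait_minutes := (24 * 60) - x + schedule_minutes
          if wait_minutes < st.1 then (wait_minutes, schedule.1, schedule.2) else st
        else st) (24 * 60, 0, 0)
     pad2 st.2.1 ++ ":" ++ pad2 st.2.2) =
    (let times := PySem.List.sorted (scheduleTimesB.map (fun s => s.1 * 60 + s.2)) (fun t => t) false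
     match times.find? (fun t => x < t && t < x + 1440) with
     | some t => fmtT t
     | none =>
       match times.find? (fun t => t < x) with
       | some t => fmtT t
       | none => "00:00") := by
  have hs : PySem.List.sorted (scheduleTimesB.map (fun s => s.1 * 60 + s.2)) (fun t => t) false
      = [840, 1160, 1200] := by decide
  have hfold : (fun (st : Int × Int × Int) (schedule : Int × Int) =>
        let schedule_minutes := schedule.1 * 60 + schedule.2
        if schedule_minutes > x then
          let wait_minutes := schedule_minutes - x
          if wait_minutes < st.1 then (wait_minutes, schedule.1, schedule.2) else st
        else if schedule_minutes < x then
          let wait_minutes := (24 * 60) - x + schedule_minutes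
          if wait_minutes < st.1 then (wait_minutes, schedule.1, schedule.2) else st
        else st) = stepA x := rfl
  simp only [hs, hfold, scheduleTimes, List.foldl_cons, List.foldl_nil]
  by_cases h1 : x ≤ -600
  · -- nothing qualifies: "00:00"
    rw [stepA_keep_gt x 19 20 _ (by omega) (by simp; try omega),
        stepA_keep_gt x 14 0 _ (by omega) (by simp; try omega),
        stepA_keep_gt x 20 0 _ (by omega) (by simp; try omega),
        List.find?_cons_of_neg (by simp; try omega), List.find?_cons_of_neg (by simp; try omega),
        List.find?_cons_of_neg (by simp; try omega), List.find?_nil,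
        List.find?_cons_of_neg (by simp; try omega), List.find?_cons_of_neg (by simp; try omega),
        List.find?_cons_of_neg (by simp; try omega), List.find?_nil]
    rfl
  · by_cases h2 : x ≤ -280
    · -- only 14:00 has a wait under a day
      rw [stepA_keep_gt x 19 20 _ (by omega) (by simp; try omega),
          stepA_take_gt x 14 0 _ (by omega) (by simp; try omega),
          stepA_keep_gt x 20 0 _ (by omega) (by simp; try omega),
          List.find?_cons_of_pos (by simp; try omega)]
      rfl
    · by_cases h3 : x < 840
      · -- next today is 14:00
        rw [stepA_take_gt x 19 20 _ (by omega) (by simp; try omega),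
            stepA_take_gt x 14 0 _ (by omega) (by simp; try omega),
            stepA_keep_gt x 20 0 _ (by omega) (by simp; try omega),
            List.find?_cons_of_pos (by simp; try omega)]
        rfl
      · by_cases h4 : x = 840
        · -- exactly 14:00: skipped, next is 19:20
          rw [stepA_take_gt x 19 20 _ (by omega) (by simp; try omega),
              stepA_keep_eq x 14 0 _ (by omega),
              stepA_keep_gt x 20 0 _ (by omega) (by simp; try omega),
              List.find?_cons_of_neg (by simp; try omega), List.find?_cons_of_pos (by simp; try omega)]
          rfl
        · by_cases h5 : x < 1160
          · -- next today is 19:20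
            rw [stepA_take_gt x 19 20 _ (by omega) (by simp; try omega),
                stepA_keep_lt x 14 0 _ (by omega) (by simp; try omega),
                stepA_keep_gt x 20 0 _ (by omega) (by simp; try omega),
                List.find?_cons_of_neg (by simp; try omega), List.find?_cons_of_pos (by simp; try omega)]
            rfl
          · by_cases h6 : x = 1160
            · -- exactly 19:20: skipped, next is 20:00
              rw [stepA_keep_eq x 19 20 _ (by omega),
                  stepA_take_lt x 14 0 _ (by omega) (by simp; try omega),
                  stepA_take_gt x 20 0 _ (by omega) (by simp; try omega),
                  List.find?_cons_of_neg (by simp; try omega), List.find?_cons_of_neg (by simp; try omega),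
                  List.find?_cons_of_pos (by simp; try omega)]
              rfl
            · by_cases h7 : x < 1200
              · -- next today is 20:00
                rw [stepA_take_lt x 19 20 _ (by omega) (by simp; try omega),
                    stepA_take_lt x 14 0 _ (by omega) (by simp; try omega),
                    stepA_take_gt x 20 0 _ (by omega) (by simp; try omega),
                    List.find?_cons_of_neg (by simp; try omega), List.find?_cons_of_neg (by simp; try omega),
                    List.find?_cons_of_pos (by simp; try omega)]
                rfl
              · by_cases h8 : x = 1200
                · -- exactly 20:00: skipped, wrap to tomorrow's 14:00
                  rw [stepA_take_lt x 19 20 _ (by omega) (by simp; try omega),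
                      stepA_take_lt x 14 0 _ (by omega) (by simp; try omega),
                      stepA_keep_eq x 20 0 _ (by omega),
                      List.find?_cons_of_neg (by simp; try omega), List.find?_cons_of_neg (by simp; try omega),
                      List.find?_cons_of_neg (by simp; try omega), List.find?_nil,
                      List.find?_cons_of_pos (by simp; try omega)]
                  rfl
                · -- past everything: wrap to tomorrow's 14:00
                  rw [stepA_take_lt x 19 20 _ (by omega) (by simp; try omega),
                      stepA_take_lt x 14 0 _ (by omega) (by simp; try omega),
                      stepA_keep_lt x 20 0 _ (by omega) (by simp; try omega),
                      List.find?_cons_of_neg (by simp; try omega), List.find?_cons_of_neg (by simp; try omega),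
                      List.find?_cons_of_neg (by simp; try omega), List.find?_nil,
                      List.find?_cons_of_pos (by simp; try omega)]
                  rfl

-- ===== VERDICT =====
theorem find_next_schedule_time_spec : Claim_equal_find_next_schedule_time := by
  intro l _ hpre
  unfold Pre_find_next_schedule_time at hpre
  unfold Spec_find_next_schedule_time find_next_schedule_time find_next_schedule_time_alt
  rw [show ((4:Int)) = ((4:Nat):Int) by norm_num, PySem.List.pyGet?_natCast,
      show ((5:Int)) = ((5:Nat):Int) by norm_num, PySem.List.pyGet?_natCast]
  simp only [List.getElem?_eq_getElem (by omega : 4 < l.length),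
    List.getElem?_eq_getElem (by omega : 5 < l.length), Option.bind_some, Option.map_some,
    Option.getD_some]
  exact core_eq _
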